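-- pv_equiv track=rewrite | github.com/I-am-PUID-0/DUMB | utils/prowlarr_settings.py | _replace_links_block
-- ===== SOURCE A (Python) =====
-- def _replace_links_block(content: str, links: list[str]) -> str:
--     lines = content.splitlines()
--     out = []
--     i = 0
--     replaced = False
--     while i < len(lines):
--         line = lines[i]
--         if line.lstrip().startswith("links:"):
--             indent = line[: len(line) - len(line.lstrip())]
--             out.append(line)
--             i += 1
--             while i < len(lines):
--                 next_line = lines[i]
--                 if next_line.strip().startswith("-") and next_line.startswith(
--                     (indent + "  ", indent + "-")
--                 ):
--                     i += 1
--                     continue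
--                 break
--             list_indent = indent + "  "
--             for link in links:
--                 out.append(f"{list_indent}- {link}")
--             replaced = True
--             continue
--         out.append(line)
--         i += 1
--     if not replaced:
--         out.append("links:")
--         for link in links:
--             out.append(f"  - {link}")
--     trailing_newline = "\n" if content.endswith("\n") else ""
--     return "\n".join(out) + trailing_newline
-- ===== SOURCE B (Python) =====
-- def _replace_links_block(content: str, links: list[str]) -> str:
--     lines = content.splitlines()
--     n = len(lines)
--     # pass 1: collect block spans (links-line index, end of old item range, indent)
--     spans = []
--     for idx, line in enumerate(lines):
--         stripped = line.lstrip()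
--         if stripped.startswith("links:"):
--             indent = line[: len(line) - len(stripped)]
--             j = idx + 1
--             while j < n and lines[j].strip().startswith("-") and lines[j].startswith(
--                 (indent + "  ", indent + "-")
--             ):
--                 j += 1
--             spans.append((idx, j, indent))
--     # pass 2: splice fresh items in place of each span's old item range
--     if not spans:
--         out = lines + ["links:"] + [f"  - {link}" for link in links]
--     else:
--         out = []
--         pos = 0
--         for start, end, indent in spans:
--             out.extend(lines[pos : start + 1])
--             out.extend(f"{indent}  - {link}" for link in links)
--             pos = end
--         out.extend(lines[pos:])
--     return "\n".join(out) + ("\n" if content.endswith("\n") else "")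
-- ===== Notes on version B (the rewrite author's own statement) =====
-- stated objective: alternative
-- what changed: A interleaves replacement inside one index-while loop with a replaced flag; B first collects the index spans of all links blocks in one enumerate pass, then rebuilds the output by splicing freshly rendered items over each span.
import Mathlib
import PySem

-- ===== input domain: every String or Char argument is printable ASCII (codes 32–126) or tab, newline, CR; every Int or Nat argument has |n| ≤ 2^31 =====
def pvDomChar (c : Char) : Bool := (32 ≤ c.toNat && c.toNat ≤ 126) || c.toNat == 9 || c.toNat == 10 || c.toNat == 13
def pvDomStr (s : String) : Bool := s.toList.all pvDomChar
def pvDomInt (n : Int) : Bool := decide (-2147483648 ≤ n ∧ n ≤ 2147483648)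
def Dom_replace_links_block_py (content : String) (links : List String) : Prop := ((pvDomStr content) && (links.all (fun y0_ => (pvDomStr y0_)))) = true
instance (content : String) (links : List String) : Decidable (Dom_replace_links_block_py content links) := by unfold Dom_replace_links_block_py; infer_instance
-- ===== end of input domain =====

-- B replaces A's single interleaved index-while loop by a two-pass design: collect the
-- index spans of all links blocks, then rebuild the output by splicing fresh items over
-- each span (objective: alternative decomposition, same cost).

-- ===== PORT A =====
-- Python string concatenation (exact: code-point append).
def pyCat (a b : String) : String := String.ofList (a.toList ++ b.toList)

-- line.lstrip().startswith("links:")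
def isLinksLine (line : String) : Bool :=
  PySem.Str.startswith (PySem.Str.lstrip line) "links:"

-- line[: len(line) - len(line.lstrip())]  (both Pythons compute the indent by this expression)
def indentOf (line : String) : String :=
  PySem.Str.slice line none
    (some ((PySem.Str.len line : Int) - (PySem.Str.len (PySem.Str.lstrip line) : Int)))

-- next_line.strip().startswith("-") and next_line.startswith((indent+"  ", indent+"-"))
def skipOk (indent next_line : String) : Bool :=
  PySem.Str.startswith (PySem.Str.strip next_line) "-" &&
    (PySem.Str.startswith next_line (pyCat indent "  ") ||
     PySem.Str.startswith next_line (pyCat indent "-"))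

-- for link in links: out.append(f"{indent}  - {link}")
def renderItems (indent : String) (links : List String) : List String :=
  links.map (fun link => pyCat (pyCat indent "  - ") link)

-- A's outer while-loop: state (remaining lines, replaced); the inner while is the dropWhile.
def aLoop (links : List String) : List String → Bool → List String × Bool
  | [], replaced => ([], replaced)
  | line :: rest, replaced =>
    if isLinksLine line then
      let indent := indentOf line
      let rest' := rest.dropWhile (skipOk indent)
      let r := aLoop links rest' true
      (line :: (renderItems indent links ++ r.1), r.2)
    else
      let r := aLoop links rest replaced
      (line :: r.1, r.2)
termination_by ls _ => ls.length
decreasing_by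
  · exact Nat.lt_succ_of_le (List.length_dropWhile_le _ _)
  · simp

def replace_links_block_py (content : String) (links : List String) : String :=
  let lines := PySem.Str.splitlines content
  let r := aLoop links lines false
  let out := if r.2 then r.1 else r.1 ++ ["links:"] ++ links.map (fun link => pyCat "  - " link)
  pyCat (PySem.Str.join "\n" out) (if PySem.Str.endswith content "\n" then "\n" else "")

-- ===== PORT B =====
-- inner while of pass 1: advance j while lines[j] satisfies the skip predicate (j < n = lines.length,
-- so lines.getD j "" is exactly Python's lines[j] here).
def scanEnd (lines : List String) (indent : String) (n j : Nat) : Nat :=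
  if j < n then
    if skipOk indent (lines.getD j "") then scanEnd lines indent n (j + 1) else j
  else j
termination_by n - j

-- pass 1: for idx, line in enumerate(lines), collect (idx, end, indent) for each links line.
def collectSpans (lines : List String) (n idx : Nat) : List (Nat × Nat × String) :=
  if idx < n then
    (if isLinksLine (lines.getD idx "") then
        [(idx, scanEnd lines (indentOf (lines.getD idx "")) n (idx + 1),
          indentOf (lines.getD idx ""))]
      else []) ++ collectSpans lines n (idx + 1)
  else []
termination_by n - idx

-- pass 2: copy lines[pos:start+1], render the items, jump pos to the span end; finally lines[pos:].
def splice (lines links : List String) (pos : Nat) : List (Nat × Nat × String) → List String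
  | [] => PySem.List.slice lines (some (pos : Int)) none
  | (start, e, indent) :: spans =>
      PySem.List.slice lines (some (pos : Int)) (some ((start : Int) + 1)) ++
        renderItems indent links ++ splice lines links e spans

def replace_links_block_py_alt (content : String) (links : List String) : String :=
  let lines := PySem.Str.splitlines content
  let spans := collectSpans lines lines.length 0
  let out := if spans.isEmpty then lines ++ ["links:"] ++ links.map (fun link => pyCat "  - " link)
             else splice lines links 0 spans
  pyCat (PySem.Str.join "\n" out) (if PySem.Str.endswith content "\n" then "\n" else "")

-- ===== PRECONDITION & SPEC =====
def Spec_replace_links_block_py (content : String) (links : List String) (out : String) : Prop := out = replace_links_block_py_alt content links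
instance (content : String) (links : List String) (out : String) : Decidable (Spec_replace_links_block_py content links out) := by unfold Spec_replace_links_block_py; infer_instance

-- ===== CLAIM (what is proved, stated in full; the proofs are below) =====
def Claim_equal_replace_links_block_py : Prop := ∀ (content : String) (links : List String), Dom_replace_links_block_py content links → Spec_replace_links_block_py content links (replace_links_block_py content links)

-- ===== LEMMAS AND PROOFS =====

theorem rstrip_cons (c : Char) (u : List Char) (h : PySem.Chars.isspace c = false) :
    PySem.Chars.rstrip (c :: u) = c :: PySem.Chars.rstrip u := by
  simp only [PySem.Chars.rstrip, List.reverse_cons, List.dropWhile_append]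
  split_ifs with he
  · simp_all [List.dropWhile, List.isEmpty_iff.mp he]
  · simp

-- a line that the inner while skips is never itself a links line
theorem skip_not_links (indent line : String) (h : skipOk indent line = true) :
    isLinksLine line = false := by
  by_contra hl
  simp only [Bool.not_eq_false] at hl
  simp only [skipOk, Bool.and_eq_true] at h
  obtain ⟨h1, _⟩ := h
  simp only [isLinksLine, PySem.Str.lstrip, PySem.Str.startswith] at hl
  simp only [PySem.Str.strip, PySem.Str.startswith, PySem.Chars.strip] at h1
  rw [show (String.ofList (PySem.Chars.lstrip line.toList)).toList
        = PySem.Chars.lstrip line.toList by simp] at hl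
  set t := PySem.Chars.lstrip line.toList with ht
  rw [show ("links:" : String).toList = ['l','i','n','k','s',':'] from rfl] at hl
  simp only [PySem.Chars.startswith] at hl h1
  obtain ⟨v, hv⟩ := List.isPrefixOf_iff_prefix.mp hl
  rw [← hv] at h1
  have h1' : ("-" : String).toList.isPrefixOf
      (PySem.Chars.rstrip (['l','i','n','k','s',':'] ++ v)) = true := by simpa using h1
  rw [show (['l','i','n','k','s',':'] ++ v) = 'l' :: (['i','n','k','s',':'] ++ v) from rfl,
    rstrip_cons 'l' _ (by decide)] at h1'
  simp [show ("-" : String).toList = ['-'] from rfl, List.isPrefixOf] at h1' 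

theorem scanEnd_lb (lines : List String) (indent : String) (n j : Nat) :
    j ≤ scanEnd lines indent n j := by
  fun_induction scanEnd <;> omega

theorem scanEnd_le (lines : List String) (indent : String) (n j : Nat) (h : j ≤ n) :
    scanEnd lines indent n j ≤ n := by
  fun_induction scanEnd <;> omega

theorem scanEnd_skips (lines : List String) (indent : String) (n j k : Nat)
    (h1 : j ≤ k) (h2 : k < scanEnd lines indent n j) :
    skipOk indent (lines.getD k "") = true := by
  rw [scanEnd] at h2
  split_ifs at h2 with hj hs
  · rcases Nat.eq_or_lt_of_le h1 with h | h
    · exact h ▸ hs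
    · exact scanEnd_skips lines indent n (j + 1) k h h2
  · omega
  · omega
termination_by n - j

theorem dropWhile_drop (lines : List String) (indent : String) (n j : Nat)
    (hn : n = lines.length) (h : j ≤ n) :
    (lines.drop j).dropWhile (skipOk indent) = lines.drop (scanEnd lines indent n j) := by
  fun_induction scanEnd with
  | case1 j hj hs ih =>
    rw [List.drop_eq_getElem_cons (by omega : j < lines.length), List.dropWhile_cons]
    rw [List.getD_eq_getElem _ _ (by omega : j < lines.length)] at hs
    rw [hs]
    exact ih (by omega)
  | case2 j hj hs =>
    rcases Nat.lt_or_ge j lines.length with h' | h'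
    · rw [List.drop_eq_getElem_cons h', List.dropWhile_cons]
      rw [List.getD_eq_getElem _ _ h'] at hs
      simp [hs]
    · simp [List.drop_eq_nil_of_le h']
  | case3 j hj =>
    simp [List.drop_eq_nil_of_le (by omega : lines.length ≤ j)]

theorem collect_lb (lines : List String) (n j : Nat) (s : Nat × Nat × String)
    (h : s ∈ collectSpans lines n j) : j ≤ s.1 := by
  rw [collectSpans] at h
  split_ifs at h with hj hL
  · simp only [List.mem_append, List.mem_singleton] at h
    rcases h with rfl | h
    · simp
    · have := collect_lb lines n (j + 1) s h; omega
  · simp only [List.nil_append] at h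
    have := collect_lb lines n (j + 1) s h; omega
  · simp at h
termination_by n - j

-- inside a span's item range collectSpans collects nothing
theorem collect_const (lines : List String) (indent : String) (n j e : Nat)
    (he : e ≤ n) (hje : j ≤ e) (hk : ∀ k, j ≤ k → k < e → skipOk indent (lines.getD k "") = true) :
    collectSpans lines n j = collectSpans lines n e := by
  rcases Nat.lt_or_ge j e with h | h
  · rw [collectSpans, if_pos (by omega)]
    have hskip := hk j (le_refl j) h
    rw [skip_not_links _ _ hskip]
    simp only [if_neg (Bool.false_ne_true), List.nil_append]
    exact collect_const lines indent n (j+1) e he (by omega) (fun k h1 h2 => hk k (by omega) h2)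
  · have : j = e := by omega
    rw [this]
termination_by e - j

theorem take_one_drop (lines : List String) (pos : Nat) (h : pos < lines.length) :
    (lines.drop pos).take 1 = [lines[pos]] := by
  rw [List.drop_eq_getElem_cons h, List.take_succ_cons, List.take_zero]

-- MAIN: from any position, A's loop output is B's splice of the collected spans,
-- and A's replaced flag is "some span was collected" (or the incoming flag).
theorem main_lemma (links lines : List String) (n pos : Nat) (r : Bool)
    (hn : n = lines.length) (hp : pos ≤ n) :
    (aLoop links (lines.drop pos) r).1 = splice lines links pos (collectSpans lines n pos)
    ∧ (aLoop links (lines.drop pos) r).2 = (r || !(collectSpans lines n pos).isEmpty) := by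
  rcases Nat.lt_or_ge pos n with hlt | hge
  · have hpl : pos < lines.length := by omega
    rw [List.drop_eq_getElem_cons hpl]
    rw [collectSpans, if_pos hlt, List.getD_eq_getElem _ _ hpl]
    by_cases hL : isLinksLine lines[pos] = true
    · -- links line: skip old items, splice fresh ones
      set indent := indentOf lines[pos] with hind
      set e := scanEnd lines indent n (pos + 1) with hedef
      have he1 : pos + 1 ≤ e := scanEnd_lb _ _ _ _
      have he2 : e ≤ n := scanEnd_le _ _ _ _ (by omega)
      have hdw : (lines.drop (pos+1)).dropWhile (skipOk indent) = lines.drop e :=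
        dropWhile_drop lines indent n (pos+1) hn (by omega)
      have ih := main_lemma links lines n e true hn he2
      rw [aLoop, if_pos hL]
      simp only [← hind, hdw]
      have hcc : collectSpans lines n (pos+1) = collectSpans lines n e :=
        collect_const lines indent n (pos+1) e he2 he1
          (fun k h1 h2 => scanEnd_skips lines indent n (pos+1) k h1 (by omega))
      rw [hL, if_pos rfl]
      simp only [List.singleton_append]
      constructor
      · have hsl : PySem.List.slice lines (some (pos : Int)) (some ((pos : Int) + 1))
            = (lines.drop pos).take 1 := by
          rw [show ((pos : Int) + 1) = (((pos + 1 : Nat)) : Int) by push_cast; ring,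
            PySem.List.slice_natCast, Nat.add_sub_cancel_left]
        rw [splice, ih.1, hcc, hsl, take_one_drop lines pos hpl]
        simp
      · rw [ih.2]; simp
    · -- ordinary line: copy it
      rw [Bool.not_eq_true] at hL
      rw [aLoop, hL]
      simp only [Bool.false_eq_true, if_false, List.nil_append]
      have ih := main_lemma links lines n (pos+1) r hn (by omega)
      refine ⟨?_, by exact ih.2⟩
      rw [ih.1]
      rcases hsp : collectSpans lines n (pos+1) with _ | ⟨⟨s, e, ind⟩, spans⟩
      · simp only [splice]
        rw [PySem.List.slice_from_natCast, PySem.List.slice_from_natCast,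
          List.drop_eq_getElem_cons hpl]
      · have hs : pos + 1 ≤ s := collect_lb lines n (pos+1) _ (by rw [hsp]; exact List.mem_cons_self)
        simp only [splice]
        rw [show ((s : Int) + 1) = ((s+1 : Nat) : Int) by push_cast; ring,
          PySem.List.slice_natCast, PySem.List.slice_natCast,
          List.drop_eq_getElem_cons hpl]
        rw [show s + 1 - pos = (s + 1 - (pos+1)) + 1 by omega, List.take_succ_cons]
        simp
  · have : pos = n := by omega
    subst this hn
    rw [List.drop_eq_nil_of_le (le_refl _)]
    rw [show collectSpans lines lines.length lines.length = [] by rw [collectSpans]; simp]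
    simp [aLoop, splice, PySem.List.slice_from_natCast, List.drop_eq_nil_of_le (le_refl _)]
termination_by n - pos
decreasing_by
  all_goals first
    | omega
    | (rw [← hind, ← hedef]; omega)

-- ===== VERDICT (by name: the statement is the Claim_ definition above) =====
theorem replace_links_block_py_spec : Claim_equal_replace_links_block_py := by
  intro content links _
  unfold Spec_replace_links_block_py replace_links_block_py replace_links_block_py_alt
  have h := main_lemma links (PySem.Str.splitlines content)
      (PySem.Str.splitlines content).length 0 false rfl (Nat.zero_le _)
  rw [List.drop_zero] at h
  rcases hsp : collectSpans (PySem.Str.splitlines content)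
      (PySem.Str.splitlines content).length 0 with _ | ⟨sp, spans⟩ <;>
    rw [hsp] at h <;>
    simp only [hsp, h.1, h.2, List.isEmpty_nil, List.isEmpty_cons, Bool.not_true,
      Bool.not_false, Bool.or_false, Bool.or_true, Bool.false_eq_true, if_false, if_true] <;>
    simp [splice]
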